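-- pv_equiv track=rewrite | github.com/miztiik/yen-go | tools/puzzle-enrichment-lab/analyzers/detectors/capture_race_detector.py | _find_race_pairs
-- ===== SOURCE A (Python) =====
-- _NEIGHBORS = ((0, 1), (0, -1), (1, 0), (-1, 0))
--
-- def _find_race_pairs(
--     black_groups: list[tuple[frozenset[tuple[int, int]], int]],
--     white_groups: list[tuple[frozenset[tuple[int, int]], int]],
--     occupied: dict[tuple[int, int], str],
--     board_size: int,
--     max_libs: int = 4,
-- ) -> list[tuple[frozenset[tuple[int, int]], frozenset[tuple[int, int]]]]:
--     """Find opposing group pairs that are adjacent and both have limited liberties."""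
--     pairs = []
--     for b_stones, b_libs in black_groups:
--         if b_libs > max_libs:
--             continue
--         b_neighbors: set[tuple[int, int]] = set()
--         for bx, by in b_stones:
--             for dx, dy in _NEIGHBORS:
--                 nx, ny = bx + dx, by + dy
--                 if 0 <= nx < board_size and 0 <= ny < board_size:
--                     b_neighbors.add((nx, ny))
--         for w_stones, w_libs in white_groups:
--             if w_libs > max_libs:
--                 continue
--             if b_neighbors & w_stones:
--                 pairs.append((b_stones, w_stones))
--     return pairs
-- ===== SOURCE B (Python) =====
-- _NEIGHBORS = ((0, 1), (0, -1), (1, 0), (-1, 0))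
--
-- def _find_race_pairs(
--     black_groups,
--     white_groups,
--     occupied,
--     board_size,
--     max_libs=4,
-- ):
--     """Inverted index: map each stone cell of a low-liberty white group to its
--     group id; each black group then collects adjacent white-group ids by dict
--     lookups on its stones' neighbors and emits them in index order."""
--     cell_to_wids = {}
--     for wid, (w_stones, w_libs) in enumerate(white_groups):
--         if w_libs <= max_libs:
--             for c in w_stones:
--                 cell_to_wids.setdefault(c, []).append(wid)
--     pairs = []
--     for b_stones, b_libs in black_groups:
--         if b_libs > max_libs:
--             continue
--         hits = set()
--         for bx, by in b_stones:
--             for dx, dy in _NEIGHBORS: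
--                 nx, ny = bx + dx, by + dy
--                 if 0 <= nx < board_size and 0 <= ny < board_size:
--                     hits.update(cell_to_wids.get((nx, ny), ()))
--         for wid in sorted(hits):
--             pairs.append((b_stones, white_groups[wid][0]))
--     return pairs
-- ===== Notes on version B (the rewrite author's own statement) =====
-- stated objective: alternative
-- what changed: Replaces the per-black-group scan over all white groups with set intersections by a precomputed inverted index from stone cell to white-group id: each black group collects adjacent white-group ids via dict lookups on its stones' neighbors and emits them in index order.
import Mathlib
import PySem

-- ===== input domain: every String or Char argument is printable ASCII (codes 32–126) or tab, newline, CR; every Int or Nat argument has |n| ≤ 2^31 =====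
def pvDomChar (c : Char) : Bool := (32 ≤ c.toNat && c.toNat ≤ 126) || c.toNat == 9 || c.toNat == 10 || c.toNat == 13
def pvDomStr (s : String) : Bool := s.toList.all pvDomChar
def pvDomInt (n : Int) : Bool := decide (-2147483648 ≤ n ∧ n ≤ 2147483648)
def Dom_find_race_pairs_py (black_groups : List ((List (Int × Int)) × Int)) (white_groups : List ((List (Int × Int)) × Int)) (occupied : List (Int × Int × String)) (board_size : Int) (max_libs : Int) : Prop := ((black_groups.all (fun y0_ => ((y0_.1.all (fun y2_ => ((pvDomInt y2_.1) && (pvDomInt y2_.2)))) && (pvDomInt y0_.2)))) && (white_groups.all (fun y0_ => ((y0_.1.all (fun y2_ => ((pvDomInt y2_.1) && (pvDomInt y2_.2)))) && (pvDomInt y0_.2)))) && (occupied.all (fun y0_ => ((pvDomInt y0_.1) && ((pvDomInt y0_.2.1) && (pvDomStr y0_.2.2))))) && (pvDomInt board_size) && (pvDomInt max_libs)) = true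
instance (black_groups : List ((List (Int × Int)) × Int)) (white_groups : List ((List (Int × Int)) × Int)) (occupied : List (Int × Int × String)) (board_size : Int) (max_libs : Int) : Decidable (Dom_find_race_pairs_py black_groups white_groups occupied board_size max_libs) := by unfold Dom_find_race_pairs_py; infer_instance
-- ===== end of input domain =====

-- B replaces A's per-black-group scan over all white groups (set intersection each) by a
-- precomputed inverted index cell → white-group ids; objective: alternative algorithm, same output.

-- ===== PORT A =====
-- _NEIGHBORS, shared module-level constant of both Pythons
def pvNB : List (Int × Int) := [(0, 1), (0, -1), (1, 0), (-1, 0)]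

-- the test '0 <= nx < board_size and 0 <= ny < board_size', identical in both Pythons
def pvInRange (bs : Int) (n : Int × Int) : Bool :=
  decide (0 ≤ n.1 ∧ n.1 < bs ∧ 0 ≤ n.2 ∧ n.2 < bs)

-- A's b_neighbors loop: all in-board neighbor cells of the group's stones
def pvBNeighbors (stones : List (Int × Int)) (bs : Int) : PySem.Set (Int × Int) :=
  stones.foldl (fun s st =>
    pvNB.foldl (fun s d =>
      if pvInRange bs (st.1 + d.1, st.2 + d.2) then PySem.Set.add s (st.1 + d.1, st.2 + d.2)
      else s) s)
    PySem.Set.empty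

def find_race_pairs_py (black_groups : List ((List (Int × Int)) × Int)) (white_groups : List ((List (Int × Int)) × Int)) (occupied : List (Int × Int × String)) (board_size : Int) (max_libs : Int) : List ((List (Int × Int)) × (List (Int × Int))) :=
  black_groups.foldl (fun pairs bg =>
    if bg.2 > max_libs then pairs
    else
      let bset := pvBNeighbors bg.1 board_size
      white_groups.foldl (fun pairs wg =>
        if wg.2 > max_libs then pairs
        else if PySem.Set.inter bset wg.1 ≠ [] then pairs ++ [(bg.1, wg.1)]
        else pairs) pairs) []

-- ===== PORT B =====
-- B's cell_to_wids: inverted index from stone cell to the ids of low-liberty white groups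
def pvIndex (wgs : List ((List (Int × Int)) × Int)) (ml : Int) : PySem.Dict (Int × Int) (List Int) :=
  (PySem.List.enumerate wgs 0).foldl (fun d iw =>
    if iw.2.2 ≤ ml then
      iw.2.1.foldl (fun d c => d.modify c [] (· ++ [iw.1])) d
    else d)
    PySem.Dict.empty

-- B's hits: ids of indexed white groups adjacent to the black group's stones
def pvHits (stones : List (Int × Int)) (bs : Int) (idx : PySem.Dict (Int × Int) (List Int)) : PySem.Set Int :=
  stones.foldl (fun h st =>
    pvNB.foldl (fun h d =>
      if pvInRange bs (st.1 + d.1, st.2 + d.2) then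
        PySem.Set.update h (idx.getD (st.1 + d.1, st.2 + d.2) [])
      else h) h)
    PySem.Set.empty

def find_race_pairs_py_alt (black_groups : List ((List (Int × Int)) × Int)) (white_groups : List ((List (Int × Int)) × Int)) (occupied : List (Int × Int × String)) (board_size : Int) (max_libs : Int) : List ((List (Int × Int)) × (List (Int × Int))) :=
  let idx := pvIndex white_groups max_libs
  black_groups.foldl (fun pairs bg =>
    if bg.2 > max_libs then pairs
    else
      pairs ++
        (PySem.List.sorted (pvHits bg.1 board_size idx) (fun i => i) false).map
          (fun i => (bg.1, (PySem.List.pyGetD white_groups i ([], 0)).1))) []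

-- ===== PRECONDITION & SPEC =====
def Spec_find_race_pairs_py (black_groups : List ((List (Int × Int)) × Int)) (white_groups : List ((List (Int × Int)) × Int)) (occupied : List (Int × Int × String)) (board_size : Int) (max_libs : Int) (out : List ((List (Int × Int)) × (List (Int × Int)))) : Prop := out = find_race_pairs_py_alt black_groups white_groups occupied board_size max_libs
instance (black_groups : List ((List (Int × Int)) × Int)) (white_groups : List ((List (Int × Int)) × Int)) (occupied : List (Int × Int × String)) (board_size : Int) (max_libs : Int) (out : List ((List (Int × Int)) × (List (Int × Int)))) : Decidable (Spec_find_race_pairs_py black_groups white_groups occupied board_size max_libs out) := by unfold Spec_find_race_pairs_py; infer_instance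

-- ===== CLAIM (what is proved, stated in full; the proofs are below) =====
def Claim_equal_find_race_pairs_py : Prop := ∀ (black_groups : List ((List (Int × Int)) × Int)) (white_groups : List ((List (Int × Int)) × Int)) (occupied : List (Int × Int × String)) (board_size : Int) (max_libs : Int), Dom_find_race_pairs_py black_groups white_groups occupied board_size max_libs → Spec_find_race_pairs_py black_groups white_groups occupied board_size max_libs (find_race_pairs_py black_groups white_groups occupied board_size max_libs)

-- ===== LEMMAS AND PROOFS =====

theorem inner_mem (bs : Int) (st : Int × Int) (ds : List (Int × Int))
    (acc : PySem.Set (Int × Int)) (n : Int × Int) :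
    n ∈ ds.foldl (fun s d =>
      if pvInRange bs (st.1 + d.1, st.2 + d.2) then PySem.Set.add s (st.1 + d.1, st.2 + d.2)
      else s) acc ↔
    n ∈ acc ∨ ∃ d ∈ ds, pvInRange bs (st.1 + d.1, st.2 + d.2) = true ∧
      n = (st.1 + d.1, st.2 + d.2) := by
  induction ds generalizing acc with
  | nil => simp
  | cons d t ih =>
    simp only [List.foldl_cons, ih]
    by_cases h : pvInRange bs (st.1 + d.1, st.2 + d.2) = true <;>
      simp [h, PySem.Set.mem_add] <;> aesop

theorem pv_mem_bneighbors (stones : List (Int × Int)) (bs : Int) (n : Int × Int) :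
    n ∈ pvBNeighbors stones bs ↔
      ∃ st ∈ stones, ∃ d ∈ pvNB,
        pvInRange bs (st.1 + d.1, st.2 + d.2) = true ∧ n = (st.1 + d.1, st.2 + d.2) := by
  unfold pvBNeighbors
  have gen : ∀ (l : List (Int × Int)) (acc : PySem.Set (Int × Int)),
      n ∈ l.foldl (fun s st =>
        pvNB.foldl (fun s d =>
          if pvInRange bs (st.1 + d.1, st.2 + d.2) then PySem.Set.add s (st.1 + d.1, st.2 + d.2)
          else s) s) acc ↔
      n ∈ acc ∨ ∃ st ∈ l, ∃ d ∈ pvNB,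
        pvInRange bs (st.1 + d.1, st.2 + d.2) = true ∧ n = (st.1 + d.1, st.2 + d.2) := by
    intro l
    induction l with
    | nil => simp
    | cons st t ih =>
      intro acc
      simp only [List.foldl_cons, ih, inner_mem]
      constructor
      · rintro ((hn | ⟨d, hd', hi, he⟩) | ⟨s', hs', d, hd', hi, he⟩)
        · tauto
        · exact Or.inr ⟨st, List.mem_cons_self .., d, hd', hi, he⟩
        · exact Or.inr ⟨s', List.mem_cons_of_mem _ hs', d, hd', hi, he⟩
      · rintro (hn | ⟨s', hs', d, hd', hi, he⟩)
        · tauto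
        · rcases List.mem_cons.mp hs' with rfl | hs''
          · exact Or.inl (Or.inr ⟨d, hd', hi, he⟩)
          · exact Or.inr ⟨s', hs'', d, hd', hi, he⟩
  rw [gen]
  simp

theorem inner_mem_hits (bs : Int) (st : Int × Int) (idx : PySem.Dict (Int × Int) (List Int))
    (ds : List (Int × Int)) (acc : PySem.Set Int) (i : Int) :
    i ∈ ds.foldl (fun h d =>
      if pvInRange bs (st.1 + d.1, st.2 + d.2) then
        PySem.Set.update h (idx.getD (st.1 + d.1, st.2 + d.2) [])
      else h) acc ↔
    i ∈ acc ∨ ∃ d ∈ ds, pvInRange bs (st.1 + d.1, st.2 + d.2) = true ∧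
      i ∈ idx.getD (st.1 + d.1, st.2 + d.2) [] := by
  induction ds generalizing acc with
  | nil => simp
  | cons d t ih =>
    simp only [List.foldl_cons, ih]
    by_cases h : pvInRange bs (st.1 + d.1, st.2 + d.2) = true <;>
      simp [h, PySem.Set.mem_update] <;> aesop

theorem pv_mem_hits (stones : List (Int × Int)) (bs : Int)
    (idx : PySem.Dict (Int × Int) (List Int)) (i : Int) :
    i ∈ pvHits stones bs idx ↔
      ∃ st ∈ stones, ∃ d ∈ pvNB,
        pvInRange bs (st.1 + d.1, st.2 + d.2) = true ∧
          i ∈ idx.getD (st.1 + d.1, st.2 + d.2) [] := by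
  unfold pvHits
  have gen : ∀ (l : List (Int × Int)) (acc : PySem.Set Int),
      i ∈ l.foldl (fun h st =>
        pvNB.foldl (fun h d =>
          if pvInRange bs (st.1 + d.1, st.2 + d.2) then
            PySem.Set.update h (idx.getD (st.1 + d.1, st.2 + d.2) [])
          else h) h) acc ↔
      i ∈ acc ∨ ∃ st ∈ l, ∃ d ∈ pvNB,
        pvInRange bs (st.1 + d.1, st.2 + d.2) = true ∧
          i ∈ idx.getD (st.1 + d.1, st.2 + d.2) [] := by
    intro l
    induction l with
    | nil => simp
    | cons st t ih =>
      intro acc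
      simp only [List.foldl_cons, ih, inner_mem_hits]
      constructor
      · rintro ((hn | ⟨d, hd', hi, he⟩) | ⟨s', hs', d, hd', hi, he⟩)
        · tauto
        · exact Or.inr ⟨st, List.mem_cons_self .., d, hd', hi, he⟩
        · exact Or.inr ⟨s', List.mem_cons_of_mem _ hs', d, hd', hi, he⟩
      · rintro (hn | ⟨s', hs', d, hd', hi, he⟩)
        · tauto
        · rcases List.mem_cons.mp hs' with rfl | hs''
          · exact Or.inl (Or.inr ⟨d, hd', hi, he⟩)
          · exact Or.inr ⟨s', hs'', d, hd', hi, he⟩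
  rw [gen]
  simp

-- inner index-building fold over the stones of one group

theorem inner_index_mem (i0 : Int) (stones : List (Int × Int))
    (d : PySem.Dict (Int × Int) (List Int)) (c : Int × Int) (i : Int) :
    i ∈ (stones.foldl (fun d c' => d.modify c' [] (· ++ [i0])) d).getD c [] ↔
      i ∈ d.getD c [] ∨ (i = i0 ∧ c ∈ stones) := by
  have : stones.foldl (fun d c' => d.modify c' [] (· ++ [i0])) d
      = (stones.map (fun c' => (c', i0))).foldl (fun d p => d.modify p.1 [] (· ++ [p.2])) d := by
    rw [List.foldl_map]
  rw [this, PySem.Dict.getD_foldl_modify_append]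
  simp [List.mem_filter, List.filter_map]
  aesop

theorem pv_mem_index (wgs : List ((List (Int × Int)) × Int)) (ml : Int)
    (c : Int × Int) (i : Int) :
    i ∈ (pvIndex wgs ml).getD c [] ↔
      ∃ iw ∈ PySem.List.enumerate wgs 0, iw.1 = i ∧ iw.2.2 ≤ ml ∧ c ∈ iw.2.1 := by
  unfold pvIndex
  have gen : ∀ (l : List (Int × ((List (Int × Int)) × Int))) (d : PySem.Dict (Int × Int) (List Int)),
      i ∈ (l.foldl (fun d iw =>
        if iw.2.2 ≤ ml then iw.2.1.foldl (fun d c' => d.modify c' [] (· ++ [iw.1])) d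
        else d) d).getD c [] ↔
      i ∈ d.getD c [] ∨ ∃ iw ∈ l, iw.1 = i ∧ iw.2.2 ≤ ml ∧ c ∈ iw.2.1 := by
    intro l
    induction l with
    | nil => simp
    | cons iw t ih =>
      intro d
      simp only [List.foldl_cons]
      by_cases h : iw.2.2 ≤ ml
      · rw [if_pos h, ih, inner_index_mem]
        constructor
        · rintro ((hn | ⟨rfl, hc⟩) | ⟨iw', hiw', rest⟩)
          · tauto
          · exact Or.inr ⟨iw, List.mem_cons_self .., rfl, h, hc⟩
          · exact Or.inr ⟨iw', List.mem_cons_of_mem _ hiw', rest⟩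
        · rintro (hn | ⟨iw', hiw', rfl, hml, hc⟩)
          · tauto
          · rcases List.mem_cons.mp hiw' with rfl | hiw''
            · exact Or.inl (Or.inr ⟨rfl, hc⟩)
            · exact Or.inr ⟨iw', hiw'', rfl, hml, hc⟩
      · rw [if_neg h, ih]
        constructor
        · rintro (hn | ⟨iw', hiw', rest⟩)
          · tauto
          · exact Or.inr ⟨iw', List.mem_cons_of_mem _ hiw', rest⟩
        · rintro (hn | ⟨iw', hiw', rfl, hml, hc⟩)
          · tauto
          · rcases List.mem_cons.mp hiw' with rfl | hiw''
            · exact absurd hml h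
            · exact Or.inr ⟨iw', hiw'', rfl, hml, hc⟩
  rw [gen]
  simp

theorem pv_nodup_hits (stones : List (Int × Int)) (bs : Int)
    (idx : PySem.Dict (Int × Int) (List Int)) : (pvHits stones bs idx).Nodup := by
  unfold pvHits
  have inner : ∀ (st : Int × Int) (ds : List (Int × Int)) (acc : PySem.Set Int), acc.Nodup →
      (ds.foldl (fun h d =>
        if pvInRange bs (st.1 + d.1, st.2 + d.2) then
          PySem.Set.update h (idx.getD (st.1 + d.1, st.2 + d.2) [])
        else h) acc).Nodup := by
    intro st ds
    induction ds with
    | nil => intro acc h; exact h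
    | cons d t ih =>
      intro acc h
      simp only [List.foldl_cons]
      by_cases hc : pvInRange bs (st.1 + d.1, st.2 + d.2) = true
      · rw [if_pos hc]; exact ih _ (PySem.Set.nodup_update _ _ h)
      · rw [if_neg hc]; exact ih _ h
  have gen : ∀ (l : List (Int × Int)) (acc : PySem.Set Int), acc.Nodup →
      (l.foldl (fun h st =>
        pvNB.foldl (fun h d =>
          if pvInRange bs (st.1 + d.1, st.2 + d.2) then
            PySem.Set.update h (idx.getD (st.1 + d.1, st.2 + d.2) [])
          else h) h) acc).Nodup := by
    intro l
    induction l with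
    | nil => intro acc h; exact h
    | cons st t ih =>
      intro acc h
      simp only [List.foldl_cons]
      exact ih _ (inner st pvNB acc h)
  exact gen stones PySem.Set.empty List.nodup_nil

-- filtered enumeration projected back to the list

theorem pv_enum_filter_map {G R : Type} (xs : List G) (p : G → Bool) (f : G → R) :
    ((PySem.List.enumerate xs 0).filter (fun iw => p iw.2)).map (fun iw => f iw.2)
      = (xs.filter p).map f := by
  have gen : ∀ (xs : List G) (s : Int),
      ((PySem.List.enumerate xs s).filter (fun iw => p iw.2)).map (fun iw => f iw.2)
        = (xs.filter p).map f := by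
    intro xs
    induction xs with
    | nil => intro s; simp [PySem.List.enumerate]
    | cons x t ih =>
      intro s
      rw [PySem.List.enumerate_cons]
      by_cases h : p x = true <;> simp [h, ih]
  exact gen xs 0

-- the per-black-group core: sorted hit ids, mapped through indexing, equal A's filtered scan

theorem pv_group_eq (wgs : List ((List (Int × Int)) × Int)) (ml bs : Int)
    (bst : List (Int × Int)) :
    (PySem.List.sorted (pvHits bst bs (pvIndex wgs ml)) (fun i => i) false).map
        (fun i => ((bst, (PySem.List.pyGetD wgs i ([], 0)).1) : (List (Int × Int)) × (List (Int × Int))))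
      = (wgs.filter (fun wg => decide (¬ wg.2 > ml ∧ PySem.Set.inter (pvBNeighbors bst bs) wg.1 ≠ []))).map
          (fun wg => (bst, wg.1)) := by
  set P : ((List (Int × Int)) × Int) → Prop :=
    fun wg => ¬ wg.2 > ml ∧ PySem.Set.inter (pvBNeighbors bst bs) wg.1 ≠ [] with hPdef
  have hP : ∀ g, P g ↔ (g.2 ≤ ml ∧ ∃ c ∈ g.1, c ∈ pvBNeighbors bst bs) := by
    intro g
    rw [hPdef]
    simp only [not_lt, Ne, List.eq_nil_iff_forall_not_mem]
    push Not
    constructor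
    · rintro ⟨h1, c, hc⟩
      rw [PySem.Set.mem_inter] at hc
      exact ⟨h1, c, hc.2, hc.1⟩
    · rintro ⟨h1, c, hc1, hc2⟩
      exact ⟨h1, c, (PySem.Set.mem_inter _ _ _).mpr ⟨hc2, hc1⟩⟩
  set L : List (Int × ((List (Int × Int)) × Int)) :=
    (PySem.List.enumerate wgs 0).filter (fun iw => decide (P iw.2)) with hLdef
  have hsorted : PySem.List.sorted (pvHits bst bs (pvIndex wgs ml)) (fun i => i) false
      = L.map (·.1) := by
    apply PySem.List.sorted_eq_of_perm_of_pairwise_lt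
    · rw [List.perm_ext_iff_of_nodup]
      · intro i
        simp only [List.mem_map, hLdef, List.mem_filter, pv_mem_hits, pv_mem_index,
          decide_eq_true_eq, hP, pv_mem_bneighbors]
        aesop
      · have hpl : L.Pairwise (fun p q => p.1 < q.1) :=
          (PySem.List.pairwise_lt_enumerate wgs 0).filter _
        exact List.pairwise_map.mpr (hpl.imp fun h => ne_of_lt h)
      · exact pv_nodup_hits ..
    · have hpl : L.Pairwise (fun p q => p.1 < q.1) :=
        (PySem.List.pairwise_lt_enumerate wgs 0).filter _
      exact List.pairwise_map.mpr hpl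
  rw [hsorted, List.map_map]
  have : L.map ((fun i => ((bst, (PySem.List.pyGetD wgs i ([], 0)).1) : (List (Int × Int)) × (List (Int × Int)))) ∘ (·.1))
      = L.map (fun iw => (bst, iw.2.1)) := by
    apply List.map_congr_left
    intro iw hiw
    have hiw' : iw ∈ PySem.List.enumerate wgs 0 := List.mem_of_mem_filter hiw
    obtain ⟨k, hk, rfl⟩ := (PySem.List.mem_enumerate_iff ..).mp hiw'
    simp [PySem.List.pyGetD_natCast, List.getD_eq_getElem?_getD, hk]
  rw [this, hLdef]
  exact pv_enum_filter_map wgs (fun wg => decide (P wg)) (fun wg => (bst, wg.1))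

-- A's inner white-group scan as a filter
theorem pv_inner_scan (wgs : List ((List (Int × Int)) × Int)) (ml : Int)
    (bst : List (Int × Int)) (bset : PySem.Set (Int × Int))
    (pairs : List ((List (Int × Int)) × (List (Int × Int)))) :
    wgs.foldl (fun pairs wg =>
        if wg.2 > ml then pairs
        else if PySem.Set.inter bset wg.1 ≠ [] then pairs ++ [(bst, wg.1)]
        else pairs) pairs
      = pairs ++ (wgs.filter (fun wg => decide (¬ wg.2 > ml ∧ PySem.Set.inter bset wg.1 ≠ []))).map
          (fun wg => (bst, wg.1)) := by
  rw [PySem.List.foldl_congr_mem wgs _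
    (fun pairs wg => if (¬ wg.2 > ml ∧ PySem.Set.inter bset wg.1 ≠ []) then pairs ++ [(bst, wg.1)] else pairs) pairs
    (by intro acc wg _; by_cases h1 : wg.2 > ml <;> by_cases h2 : PySem.Set.inter bset wg.1 ≠ [] <;>
        simp [h1, h2])]
  exact PySem.List.foldl_append_ite _ _ wgs pairs

-- ===== VERDICT (by name: the statement is the Claim_ definition above) =====
theorem find_race_pairs_py_spec : Claim_equal_find_race_pairs_py := by
  intro black_groups white_groups occupied board_size max_libs _
  unfold Spec_find_race_pairs_py find_race_pairs_py find_race_pairs_py_alt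
  apply PySem.List.foldl_congr_mem
  intro acc bg _
  by_cases h : bg.2 > max_libs
  · simp only [if_pos h]
  · simp only [if_neg h, pv_inner_scan]
    rw [pv_group_eq]
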